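-- pv_equiv track=rewrite | github.com/grivan/advent-of-code-2022 | day18/day18.py | find_int
-- ===== SOURCE A (Python) =====
-- def find_int(cubes):
-- 	n = len(cubes)
-- 	inter = 0
-- 	for i in range(n):
-- 		for j in range(i+1, n):
-- 			c1 = cubes[i]
-- 			c2 = cubes[j]
--
-- 			x = abs(c1[0] - c2[0])
-- 			y = abs(c1[1] - c2[1])
-- 			z = abs(c1[2] - c2[2])
--
-- 			if x == 0 and y == 0 and z == 1:
-- 				inter += 1
-- 			if x == 0 and y == 1 and z == 0:
-- 				inter += 1
-- 			if x == 1 and y == 0 and z == 0: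
-- 				inter += 1
--
-- 	return inter * 2
-- ===== SOURCE B (Python) =====
-- def find_int(cubes):
--     count = {}
--     for c in cubes:
--         k = (c[0], c[1], c[2])
--         count[k] = count.get(k, 0) + 1
--     total = 0
--     for (x, y, z), m in count.items():
--         for nb in ((x + 1, y, z), (x - 1, y, z), (x, y + 1, z), (x, y - 1, z), (x, y, z + 1), (x, y, z - 1)):
--             total += m * count.get(nb, 0)
--     return total
-- ===== Notes on version B (the rewrite author's own statement) =====
-- stated objective: faster
-- what changed: Replaces A's O(n^2) scan over all cube pairs with a single pass that builds a dict counting occurrences of each (x,y,z) coordinate triple and then sums count[k]*count[nb] over the 6 face neighbours nb of each distinct triple, which counts ordered adjacent pairs directly (= A's unordered pair count times 2).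
-- outside the precondition, e.g. on find_int([(1,)]): A returns 0, B raises IndexError
import Mathlib
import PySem

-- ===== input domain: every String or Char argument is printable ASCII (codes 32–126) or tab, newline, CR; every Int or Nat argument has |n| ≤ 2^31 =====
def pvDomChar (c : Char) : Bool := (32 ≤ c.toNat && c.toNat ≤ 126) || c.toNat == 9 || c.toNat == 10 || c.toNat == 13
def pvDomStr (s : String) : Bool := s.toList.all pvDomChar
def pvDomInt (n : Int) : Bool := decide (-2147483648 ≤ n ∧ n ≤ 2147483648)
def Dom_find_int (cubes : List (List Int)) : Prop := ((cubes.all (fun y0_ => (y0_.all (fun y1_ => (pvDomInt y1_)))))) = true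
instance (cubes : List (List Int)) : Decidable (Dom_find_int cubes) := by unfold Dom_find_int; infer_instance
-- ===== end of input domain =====

-- B replaces A's all-pairs scan by a coordinate counter queried at the 6 face neighbours of each distinct cube; equal return value on Pre_.

-- ===== PORT A =====
def find_int (cubes : List (List Int)) : Int :=
  let n : Int := cubes.length
  let inter := (PySem.List.pyRange 0 n 1).foldl (fun inter i =>
    (PySem.List.pyRange (i + 1) n 1).foldl (fun inter j =>
      let c1 := PySem.List.pyGetD cubes i []
      let c2 := PySem.List.pyGetD cubes j []
      let x := |PySem.List.pyGetD c1 0 0 - PySem.List.pyGetD c2 0 0|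
      let y := |PySem.List.pyGetD c1 1 0 - PySem.List.pyGetD c2 1 0|
      let z := |PySem.List.pyGetD c1 2 0 - PySem.List.pyGetD c2 2 0|
      let inter := if x = 0 ∧ y = 0 ∧ z = 1 then inter + 1 else inter
      let inter := if x = 0 ∧ y = 1 ∧ z = 0 then inter + 1 else inter
      let inter := if x = 1 ∧ y = 0 ∧ z = 0 then inter + 1 else inter
      inter) inter) 0
  inter * 2

-- ===== PORT B =====
def find_int_alt (cubes : List (List Int)) : Int :=
  let count := cubes.foldl (fun d c =>
    let k : Int × Int × Int :=
      (PySem.List.pyGetD c 0 0, PySem.List.pyGetD c 1 0, PySem.List.pyGetD c 2 0)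
    d.insert k (d.getD k 0 + 1)) PySem.Dict.empty
  count.items.foldl (fun total p =>
    let x := p.1.1
    let y := p.1.2.1
    let z := p.1.2.2
    [(x + 1, y, z), (x - 1, y, z), (x, y + 1, z), (x, y - 1, z), (x, y, z + 1), (x, y, z - 1)].foldl
      (fun total nb => total + p.2 * count.getD nb 0) total) 0

-- ===== PRECONDITION & SPEC =====
-- Pre_ excludes lists containing a cube with fewer than 3 coordinates: Python A raises IndexError
-- on them whenever the list has at least 2 cubes, and B's own indexing raises even on a singleton
-- list where A's pair loop never runs and it happens to return 0.
def Pre_find_int (cubes : List (List Int)) : Prop := ∀ c ∈ cubes, 3 ≤ c.length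
instance (cubes : List (List Int)) : Decidable (Pre_find_int cubes) := by unfold Pre_find_int; infer_instance
def pvWitness_find_int : List (List Int) := [[0, 0, 0], [0, 0, 1], [5, 5, 5]]
def Spec_find_int (cubes : List (List Int)) (out : Int) : Prop := out = find_int_alt cubes
instance (cubes : List (List Int)) (out : Int) : Decidable (Spec_find_int cubes out) := by unfold Spec_find_int; infer_instance

-- ===== CLAIM (what is proved, stated in full; the proofs are below) =====
def Claim_equal_find_int : Prop := ∀ (cubes : List (List Int)), Dom_find_int cubes → Pre_find_int cubes → Spec_find_int cubes (find_int cubes)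

-- ===== LEMMAS AND PROOFS =====

-- key of a cube: its first three coordinates, read exactly as both ports read them
def kOf (c : List Int) : Int × Int × Int :=
  (PySem.List.pyGetD c 0 0, PySem.List.pyGetD c 1 0, PySem.List.pyGetD c 2 0)

-- the 6 face neighbours of a point (B's neighbour tuple, as a list)
def nbrs (k : Int × Int × Int) : List (Int × Int × Int) :=
  [(k.1 + 1, k.2.1, k.2.2), (k.1 - 1, k.2.1, k.2.2), (k.1, k.2.1 + 1, k.2.2),
   (k.1, k.2.1 - 1, k.2.2), (k.1, k.2.1, k.2.2 + 1), (k.1, k.2.1, k.2.2 - 1)]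

-- face-adjacency indicator
def ind (a b : Int × Int × Int) : Int := if b ∈ nbrs a then 1 else 0

-- Σ_{i<j} ind ks[i] ks[j], structurally
def upper : List (Int × Int × Int) → Int
  | [] => 0
  | a :: rest => ((rest.map (ind a)).sum) + upper rest

lemma ind_symm (a b : Int × Int × Int) : ind a b = ind b a := by
  obtain ⟨x, y, z⟩ := a; obtain ⟨u, v, w⟩ := b
  simp only [ind, nbrs, List.mem_cons, List.not_mem_nil, or_false, Prod.mk.injEq]
  congr 1
  rw [eq_iff_iff]
  constructor <;> (rintro (h|h|h|h|h|h) <;> omega)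

lemma ind_self (a : Int × Int × Int) : ind a a = 0 := by
  obtain ⟨x, y, z⟩ := a
  simp only [ind, nbrs, List.mem_cons, List.not_mem_nil, or_false, Prod.mk.injEq]
  rw [if_neg]; omega

lemma nbrs_nodup (a : Int × Int × Int) : (nbrs a).Nodup := by
  obtain ⟨x, y, z⟩ := a
  simp only [nbrs, List.nodup_cons, List.mem_cons, List.not_mem_nil, or_false, Prod.mk.injEq,
    List.nodup_nil, and_true, not_or]
  refine ⟨⟨?_,?_,?_,?_,?_⟩,⟨?_,?_,?_,?_⟩,⟨?_,?_,?_⟩,⟨?_,?_⟩,?_,not_false⟩ <;> (try simp) <;> omega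

-- A's per-pair body adds exactly the adjacency indicator of the two keys
lemma body_eq (c1 c2 : List Int) (inter : Int) :
    (let x := |PySem.List.pyGetD c1 0 0 - PySem.List.pyGetD c2 0 0|
     let y := |PySem.List.pyGetD c1 1 0 - PySem.List.pyGetD c2 1 0|
     let z := |PySem.List.pyGetD c1 2 0 - PySem.List.pyGetD c2 2 0|
     let inter := if x = 0 ∧ y = 0 ∧ z = 1 then inter + 1 else inter
     let inter := if x = 0 ∧ y = 1 ∧ z = 0 then inter + 1 else inter
     let inter := if x = 1 ∧ y = 0 ∧ z = 0 then inter + 1 else inter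
     inter) = inter + ind (kOf c1) (kOf c2) := by
  simp only [kOf, ind, nbrs, List.mem_cons, List.not_mem_nil, or_false, Prod.mk.injEq,
    abs_eq_zero, sub_eq_zero]
  generalize PySem.List.pyGetD c1 0 0 = x1
  generalize PySem.List.pyGetD c1 1 0 = y1
  generalize PySem.List.pyGetD c1 2 0 = z1
  generalize PySem.List.pyGetD c2 0 0 = x2
  generalize PySem.List.pyGetD c2 1 0 = y2
  generalize PySem.List.pyGetD c2 2 0 = z2
  have h1 : ∀ u v : Int, (|u - v| = 1) ↔ (u = v + 1 ∨ u = v - 1) := by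
    intro u v; rw [abs_eq (by norm_num : (0:Int) ≤ 1)]; omega
  simp only [h1]
  split_ifs <;> omega

lemma upper_append (ks : List (Int × Int × Int)) (k : Int × Int × Int) :
    upper (ks ++ [k]) = upper ks + (ks.map (fun a => ind a k)).sum := by
  induction ks with
  | nil => simp [upper]
  | cons a rest ih => simp [upper, ih]; ring

lemma two_upper_eq_dsum (ks : List (Int × Int × Int)) :
    2 * upper ks = (ks.map (fun a => (ks.map (ind a)).sum)).sum := by
  induction ks with
  | nil => simp [upper]
  | cons a rest ih =>
    simp only [upper, List.map_cons, List.sum_cons, ind_self, zero_add]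
    have hsym : (rest.map (fun x => ind x a)).sum = (rest.map (ind a)).sum :=
      congrArg List.sum (List.map_congr_left (fun x _ => ind_symm x a))
    have hsplit : (rest.map (fun x => ind x a + (ind x a :: rest.map (ind x)).sum)).sum
        = (rest.map (fun x => ind x a)).sum + (rest.map (fun x => ind x a + (rest.map (ind x)).sum)).sum := by
      simp only [List.sum_cons]
      rw [PySem.List.sum_map_add_int rest (fun x => ind x a) (fun x => ind x a + (rest.map (ind x)).sum)]
    have hsplit2 : (rest.map (fun x => ind x a + (rest.map (ind x)).sum)).sum
        = (rest.map (fun x => ind x a)).sum + (rest.map (fun x => (rest.map (ind x)).sum)).sum :=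
      PySem.List.sum_map_add_int rest _ _
    rw [hsplit2, hsym, ← ih]
    ring

lemma ite_eq_sum (ns : List (Int × Int × Int)) (hn : ns.Nodup) (b : Int × Int × Int) :
    (ns.map (fun nb => if b = nb then (1:Int) else 0)).sum = if b ∈ ns then 1 else 0 := by
  induction ns with
  | nil => simp
  | cons x ns ih =>
    simp only [List.nodup_cons] at hn
    simp only [List.map_cons, List.sum_cons, ih hn.2, List.mem_cons]
    by_cases hbx : b = x <;> simp [hbx, hn.1]

lemma row_eq_nbr_counts (ks : List (Int × Int × Int)) (a : Int × Int × Int) :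
    (ks.map (ind a)).sum = ((nbrs a).map (fun nb => (ks.count nb : Int))).sum := by
  induction ks with
  | nil => simp
  | cons b ks ih =>
    simp only [List.map_cons, List.sum_cons, ih]
    have hcnt : ((nbrs a).map (fun nb => ((b :: ks).count nb : Int))).sum
        = ((nbrs a).map (fun nb => (ks.count nb : Int) + if b = nb then 1 else 0)).sum := by
      refine congrArg List.sum (List.map_congr_left (fun nb _ => ?_))
      rw [List.count_cons]
      push_cast
      simp [beq_iff_eq]
    rw [hcnt, PySem.List.sum_map_add_int, ite_eq_sum _ (nbrs_nodup a) b]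
    simp only [ind]
    ring

lemma group_by_count (ks : List (Int × Int × Int)) (g : Int × Int × Int → Int) :
    (ks.map g).sum = ((PySem.Set.ofList ks).map (fun k => (ks.count k : Int) * g k)).sum := by
  have h1 := Finset.sum_list_map_count ks g
  have hnd := PySem.Set.nodup_ofList (xs := ks)
  have hfin : (PySem.Set.ofList ks).toFinset = ks.toFinset := by
    apply Finset.ext; intro x; simp [List.mem_toFinset, PySem.Set.mem_ofList]
  have h2 := List.sum_toFinset (fun k => (ks.count k : Int) * g k) hnd
  rw [h1, ← h2, hfin]
  apply Finset.sum_congr rfl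
  intro x _
  have hc : @List.count _ instBEqOfDecidableEq x ks = List.count x ks := by
    rw [@List.count_eq_countP, @List.count_eq_countP]
    refine List.countP_congr (fun a _ => ?_)
    simp
  rw [← hc]
  exact nsmul_eq_mul (@List.count _ instBEqOfDecidableEq x ks) (g x)

lemma pyRange_empty (a : Int) : PySem.List.pyRange a a 1 = [] := by
  refine List.eq_nil_of_length_eq_zero ?_
  rw [PySem.List.length_pyRange_one]
  simp

lemma find_int_sum (cubes : List (List Int)) :
    find_int cubes =
      2 * ((PySem.List.pyRange 0 (cubes.length : Int) 1).map (fun i =>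
        ((PySem.List.pyRange (i + 1) (cubes.length : Int) 1).map (fun j =>
          ind (kOf (PySem.List.pyGetD cubes i [])) (kOf (PySem.List.pyGetD cubes j [])))).sum)).sum := by
  unfold find_int
  have hinner : ∀ (i : Int) (inter : Int),
      (PySem.List.pyRange (i + 1) (cubes.length : Int) 1).foldl (fun inter j =>
        let c1 := PySem.List.pyGetD cubes i []
        let c2 := PySem.List.pyGetD cubes j []
        let x := |PySem.List.pyGetD c1 0 0 - PySem.List.pyGetD c2 0 0|
        let y := |PySem.List.pyGetD c1 1 0 - PySem.List.pyGetD c2 1 0|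
        let z := |PySem.List.pyGetD c1 2 0 - PySem.List.pyGetD c2 2 0|
        let inter := if x = 0 ∧ y = 0 ∧ z = 1 then inter + 1 else inter
        let inter := if x = 0 ∧ y = 1 ∧ z = 0 then inter + 1 else inter
        let inter := if x = 1 ∧ y = 0 ∧ z = 0 then inter + 1 else inter
        inter) inter
      = inter + ((PySem.List.pyRange (i + 1) (cubes.length : Int) 1).map (fun j =>
          ind (kOf (PySem.List.pyGetD cubes i [])) (kOf (PySem.List.pyGetD cubes j [])))).sum := by
    intro i inter
    have hb : (fun (inter : Int) (j : Int) =>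
        let c1 := PySem.List.pyGetD cubes i []
        let c2 := PySem.List.pyGetD cubes j []
        let x := |PySem.List.pyGetD c1 0 0 - PySem.List.pyGetD c2 0 0|
        let y := |PySem.List.pyGetD c1 1 0 - PySem.List.pyGetD c2 1 0|
        let z := |PySem.List.pyGetD c1 2 0 - PySem.List.pyGetD c2 2 0|
        let inter := if x = 0 ∧ y = 0 ∧ z = 1 then inter + 1 else inter
        let inter := if x = 0 ∧ y = 1 ∧ z = 0 then inter + 1 else inter
        let inter := if x = 1 ∧ y = 0 ∧ z = 0 then inter + 1 else inter
        inter)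
        = fun inter j => inter + ind (kOf (PySem.List.pyGetD cubes i [])) (kOf (PySem.List.pyGetD cubes j [])) := by
      funext inter j
      exact body_eq _ _ _
    rw [hb, PySem.List.foldl_add]
  simp only [hinner]
  rw [PySem.List.foldl_add]
  ring

lemma sum_form_eq_upper (cubes : List (List Int)) :
    ((PySem.List.pyRange 0 (cubes.length : Int) 1).map (fun i =>
        ((PySem.List.pyRange (i + 1) (cubes.length : Int) 1).map (fun j =>
          ind (kOf (PySem.List.pyGetD cubes i [])) (kOf (PySem.List.pyGetD cubes j [])))).sum)).sum
      = upper (cubes.map kOf) := by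
  induction cubes using List.reverseRecOn with
  | nil => simp [upper]
  | append_singleton cubes c ih =>
    have hlen : (((cubes ++ [c]).length : Nat) : Int) = (cubes.length : Int) + 1 := by
      simp [List.length_append]
    have hN : (0 : Int) ≤ (cubes.length : Int) := Int.natCast_nonneg _
    rw [hlen, PySem.List.pyRange_one_succ_right hN]
    -- last cube lookup
    have hlast : PySem.List.pyGetD (cubes ++ [c]) ((cubes.length : Nat) : Int) [] = c := by
      rw [PySem.List.pyGetD_natCast]
      rw [List.getD_append_right _ _ _ _ (le_refl _)]
      simp
    -- stable lookups
    have hstable : ∀ i : Int, 0 ≤ i → i < (cubes.length : Int) →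
        PySem.List.pyGetD (cubes ++ [c]) i [] = PySem.List.pyGetD cubes i [] := by
      intro i h0 hi
      obtain ⟨m, rfl⟩ := Int.eq_ofNat_of_zero_le h0
      rw [PySem.List.pyGetD_natCast, PySem.List.pyGetD_natCast]
      exact List.getD_append _ _ _ m (by exact_mod_cast hi)
    rw [List.map_append, List.sum_append]
    -- the appended outer term (i = N) is zero
    have hzero : ([(cubes.length : Int)].map (fun i =>
        ((PySem.List.pyRange (i + 1) ((cubes.length : Int) + 1) 1).map (fun j =>
          ind (kOf (PySem.List.pyGetD (cubes ++ [c]) i [])) (kOf (PySem.List.pyGetD (cubes ++ [c]) j [])))).sum)).sum = 0 := by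
      simp only [List.map_cons, List.map_nil, List.sum_cons, List.sum_nil]
      rw [pyRange_empty]
      simp
    rw [hzero, add_zero]
    -- rewrite each outer term for i ∈ [0, N)
    have hmain : ∀ i ∈ PySem.List.pyRange 0 (cubes.length : Int) 1,
        ((PySem.List.pyRange (i + 1) ((cubes.length : Int) + 1) 1).map (fun j =>
          ind (kOf (PySem.List.pyGetD (cubes ++ [c]) i [])) (kOf (PySem.List.pyGetD (cubes ++ [c]) j [])))).sum
        = ((PySem.List.pyRange (i + 1) (cubes.length : Int) 1).map (fun j =>
          ind (kOf (PySem.List.pyGetD cubes i [])) (kOf (PySem.List.pyGetD cubes j [])))).sum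
          + ind (kOf (PySem.List.pyGetD cubes i [])) (kOf c) := by
      intro i hi
      rw [PySem.List.mem_pyRange_one] at hi
      rw [PySem.List.pyRange_one_succ_right (by omega), List.map_append, List.sum_append]
      rw [hstable i hi.1 hi.2]
      congr 1
      · refine congrArg List.sum (List.map_congr_left (fun j hj => ?_))
        rw [PySem.List.mem_pyRange_one] at hj
        rw [hstable j (by omega) hj.2]
      · simp [hlast]
    rw [List.map_congr_left hmain, PySem.List.sum_map_add_int, ih]
    -- the added column equals the map over cubes
    have hcol : ((PySem.List.pyRange 0 (cubes.length : Int) 1).map (fun i =>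
        ind (kOf (PySem.List.pyGetD cubes i [])) (kOf c))).sum
        = ((cubes.map kOf).map (fun a => ind a (kOf c))).sum := by
      have h1 : (PySem.List.pyRange 0 (cubes.length : Int) 1).map (fun i =>
          ind (kOf (PySem.List.pyGetD cubes i [])) (kOf c))
          = ((PySem.List.pyRange 0 (cubes.length : Int) 1).map (fun i =>
              PySem.List.pyGetD cubes i [])).map (fun c' => ind (kOf c') (kOf c)) := by
        rw [List.map_map]; rfl
      rw [h1]
      have h2 : (PySem.List.pyRange 0 (cubes.length : Int) 1).map (fun i =>
          PySem.List.pyGetD cubes i []) = cubes := PySem.List.map_pyGetD_pyRange_zero cubes []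
      rw [h2, List.map_map]
      rfl
    rw [hcol, List.map_append]
    show _ = upper (List.map kOf cubes ++ [kOf c])
    rw [upper_append]

lemma find_int_alt_eq (cubes : List (List Int)) :
    find_int_alt cubes =
      ((PySem.Set.ofList (cubes.map kOf)).map (fun k =>
        (((nbrs k).map (fun nb => ((cubes.map kOf).count k : Int) * ((cubes.map kOf).count nb : Int))).sum))).sum := by
  unfold find_int_alt
  have hc : cubes.foldl (fun d c =>
      let k : Int × Int × Int :=
        (PySem.List.pyGetD c 0 0, PySem.List.pyGetD c 1 0, PySem.List.pyGetD c 2 0)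
      d.insert k (d.getD k 0 + 1)) PySem.Dict.empty
      = PySem.Dict.counter (cubes.map kOf) := by
    rw [← PySem.Dict.foldl_insert_getD_add_one_eq_counter, List.foldl_map]
    rfl
  rw [hc]
  have hfold : ∀ (items : List ((Int × Int × Int) × Int)) (t0 : Int),
      items.foldl (fun total p =>
        let x := p.1.1
        let y := p.1.2.1
        let z := p.1.2.2
        [(x + 1, y, z), (x - 1, y, z), (x, y + 1, z), (x, y - 1, z), (x, y, z + 1), (x, y, z - 1)].foldl
          (fun total nb => total + p.2 * (PySem.Dict.counter (cubes.map kOf)).getD nb 0) total) t0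
      = t0 + (items.map (fun p => ((nbrs p.1).map (fun nb => p.2 * (PySem.Dict.counter (cubes.map kOf)).getD nb 0)).sum)).sum := by
    intro items t0
    have hb : (fun (total : Int) (p : (Int × Int × Int) × Int) =>
        let x := p.1.1
        let y := p.1.2.1
        let z := p.1.2.2
        [(x + 1, y, z), (x - 1, y, z), (x, y + 1, z), (x, y - 1, z), (x, y, z + 1), (x, y, z - 1)].foldl
          (fun total nb => total + p.2 * (PySem.Dict.counter (cubes.map kOf)).getD nb 0) total)
        = fun total p => total + ((nbrs p.1).map (fun nb => p.2 * (PySem.Dict.counter (cubes.map kOf)).getD nb 0)).sum := by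
      funext total p
      rw [PySem.List.foldl_add]
      rfl
    rw [hb, PySem.List.foldl_add]
  rw [hfold, PySem.Dict.items_counter, List.map_map, zero_add]
  refine congrArg List.sum (List.map_congr_left (fun k _ => ?_))
  simp only [Function.comp]
  refine congrArg List.sum (List.map_congr_left (fun nb _ => ?_))
  rw [PySem.Dict.getD_counter]

lemma find_int_eq_upper (cubes : List (List Int)) :
    find_int cubes = 2 * upper (cubes.map kOf) := by
  rw [find_int_sum, sum_form_eq_upper]

-- ===== VERDICT (by name: the statement is the Claim_ definition above) =====
theorem find_int_spec : Claim_equal_find_int := by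
  intro cubes _ _
  unfold Spec_find_int
  rw [find_int_eq_upper, two_upper_eq_dsum, find_int_alt_eq]
  have h1 : ((cubes.map kOf).map (fun a => ((cubes.map kOf).map (ind a)).sum)).sum
      = ((cubes.map kOf).map (fun a => ((nbrs a).map (fun nb => ((cubes.map kOf).count nb : Int))).sum)).sum := by
    exact congrArg List.sum (List.map_congr_left (fun a _ => row_eq_nbr_counts _ a))
  rw [h1, group_by_count]
  refine congrArg List.sum (List.map_congr_left (fun k _ => ?_))
  rw [← List.sum_map_mul_left]
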